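-- pv_equiv track=rewrite | github.com/ArthurAntero/Projeto_TR1 | camada_enlace/enquadramento/contagem_caracteres.py | Transmissor_contagem_caractere_bytes
-- ===== SOURCE A (Python) =====
-- def Transmissor_contagem_caractere_bytes(entrada, tamanho_quadro=6):
--     """
--     Função para realizar o enquadramento de uma string de bits utilizando contagem de bytes.
--
--     Parâmetros:
--     - entrada: String de bytes.
--     """
--     tamanho_quadro=6
--     lista_bytes = [format(ord(char), '08b') for char in entrada]
--     comprimento_total = len(lista_bytes)
--
--     lista_enquadrada = []
--
--     if comprimento_total <= tamanho_quadro: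
--         # Se o comprimento total for menor ou igual ao tamanho do quadro, adicionar o comprimento no início
--         quadro = format(comprimento_total, '08b')  # Formatar o comprimento como 8 bits
--         quadro += ''.join(lista_bytes)
--         lista_enquadrada.append(quadro)
--     else:
--         # Quebra a entrada em múltiplos quadros
--         aux1 = comprimento_total % tamanho_quadro  # Bytes restantes após os quadros completos
--         num_quadros_completos = comprimento_total // tamanho_quadro  # Número de quadros completos
--
--         # Inserir comprimento dos quadros completos
--         for i in range(num_quadros_completos):
--             quadro = format(tamanho_quadro, '08b')  # Formatar o comprimento como 8 bits
--             quadro += ''.join(lista_bytes[i * tamanho_quadro:(i + 1) * tamanho_quadro])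
--             lista_enquadrada.append(quadro)
--
--         # Inserir comprimento do último quadro (caso haja um quadro incompleto)
--         if aux1 != 0:
--             quadro = format(aux1, '08b')  # Formatar o comprimento como 8 bits
--             quadro += ''.join(lista_bytes[num_quadros_completos * tamanho_quadro:])
--             lista_enquadrada.append(quadro)
--
--     string_enquadrada = ''.join(lista_enquadrada)
--     return string_enquadrada
-- ===== SOURCE B (Python) =====
-- def Transmissor_contagem_caractere_bytes(entrada, tamanho_quadro=6):
--     frames = []
--     buf = ''
--     cnt = 0
--     for c in entrada:
--         buf += format(ord(c), '08b')
--         cnt += 1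
--         if cnt == 6:
--             frames.append(format(6, '08b') + buf)
--             buf = ''
--             cnt = 0
--     if cnt != 0 or not frames:
--         frames.append(format(cnt, '08b') + buf)
--     return ''.join(frames)
-- ===== Notes on version B (the rewrite author's own statement) =====
-- stated objective: alternative
-- what changed: Single streaming pass over the characters with a bit-buffer and a counter that flushes a length-prefixed frame every 6 characters (plus one final flush), instead of A's three-way structure of a small-input branch, a counted loop over index slices lista_bytes[i*6:(i+1)*6] and a separate remainder block; no indices or slicing remain.
import Mathlib
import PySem

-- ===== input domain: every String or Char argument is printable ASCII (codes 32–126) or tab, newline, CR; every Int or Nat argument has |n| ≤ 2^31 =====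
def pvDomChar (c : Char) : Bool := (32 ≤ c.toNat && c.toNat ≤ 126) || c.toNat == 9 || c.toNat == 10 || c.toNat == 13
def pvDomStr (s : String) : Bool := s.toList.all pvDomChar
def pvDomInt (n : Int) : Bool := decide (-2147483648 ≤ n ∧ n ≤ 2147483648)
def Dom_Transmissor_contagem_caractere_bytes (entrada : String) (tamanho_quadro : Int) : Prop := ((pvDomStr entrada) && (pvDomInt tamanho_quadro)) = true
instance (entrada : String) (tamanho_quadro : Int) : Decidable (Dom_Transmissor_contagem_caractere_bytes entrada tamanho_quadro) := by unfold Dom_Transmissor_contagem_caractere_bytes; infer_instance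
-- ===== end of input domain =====

-- B replaces A's small-input branch + counted slice loop + remainder block by one
-- streaming pass (buffer + counter, flush each 6 chars); A = B everywhere.

-- format(n, '08b'): 8-bit zero-padded binary; exact for n < 256, and every value
-- formatted here (frame lengths ≤ 6 and ASCII codes ≤ 126) is < 256.
def pvFmt08b (n : Nat) : List Char :=
  ((List.range 8).reverse).map (fun i => if n.testBit i then '1' else '0')

-- ===== PORT A =====
-- A's body, factored over the list of byte-strings (each a List Char); strings are
-- built as List Char and wrapped into a String only at the very end ('' .join = flatten).
def pvACore (lista_bytes : List (List Char)) : List Char :=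
  let tamanho_quadro : Nat := 6          -- A reassigns tamanho_quadro = 6
  let comprimento_total := lista_bytes.length
  let lista_enquadrada : List (List Char) :=
    if comprimento_total ≤ tamanho_quadro then
      [pvFmt08b comprimento_total ++ lista_bytes.flatten]
    else
      let aux1 := comprimento_total % tamanho_quadro
      let num_quadros_completos := comprimento_total / tamanho_quadro
      let frames := (List.range num_quadros_completos).foldl
        (fun acc i => acc ++
          [pvFmt08b tamanho_quadro ++
            (PySem.List.slice lista_bytes (some ((i * tamanho_quadro : Nat) : Int))
              (some (((i + 1) * tamanho_quadro : Nat) : Int))).flatten]) []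
      if aux1 ≠ 0 then
        frames ++ [pvFmt08b aux1 ++
          (PySem.List.slice lista_bytes
            (some ((num_quadros_completos * tamanho_quadro : Nat) : Int)) none).flatten]
      else frames
  lista_enquadrada.flatten

def Transmissor_contagem_caractere_bytes (entrada : String) (tamanho_quadro : Int) : String :=
  String.ofList (pvACore (entrada.toList.map (fun c => pvFmt08b c.toNat)))

-- ===== PORT B =====
-- B's for-loop over the characters with state (frames, buf, cnt), then the final
-- flush 'if cnt != 0 or not frames': recursion on the remaining characters.
def pvBGo (frames : List (List Char)) (buf : List Char) (cnt : Nat) :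
    List Char → List (List Char)
  | [] => if cnt ≠ 0 ∨ frames = [] then frames ++ [pvFmt08b cnt ++ buf] else frames
  | c :: rest =>
      let buf := buf ++ pvFmt08b c.toNat
      let cnt := cnt + 1
      if cnt = 6 then pvBGo (frames ++ [pvFmt08b 6 ++ buf]) [] 0 rest
      else pvBGo frames buf cnt rest

def Transmissor_contagem_caractere_bytes_alt (entrada : String) (tamanho_quadro : Int) : String :=
  String.ofList (pvBGo [] [] 0 entrada.toList).flatten

-- ===== PRECONDITION & SPEC =====
def Spec_Transmissor_contagem_caractere_bytes (entrada : String) (tamanho_quadro : Int) (out : String) : Prop := out = Transmissor_contagem_caractere_bytes_alt entrada tamanho_quadro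
instance (entrada : String) (tamanho_quadro : Int) (out : String) : Decidable (Spec_Transmissor_contagem_caractere_bytes entrada tamanho_quadro out) := by unfold Spec_Transmissor_contagem_caractere_bytes; infer_instance

-- ===== CLAIM (what is proved, stated in full; the proofs are below) =====
def Claim_equal_Transmissor_contagem_caractere_bytes : Prop := ∀ (entrada : String) (tamanho_quadro : Int), Dom_Transmissor_contagem_caractere_bytes entrada tamanho_quadro → Spec_Transmissor_contagem_caractere_bytes entrada tamanho_quadro (Transmissor_contagem_caractere_bytes entrada tamanho_quadro)

-- ===== LEMMAS AND PROOFS =====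

-- ''.join(format(ord(c),'08b') for c in s)
def pvBits (s : List Char) : List Char := (s.map (fun c => pvFmt08b c.toNat)).flatten

-- The clean recursive form both ports are reduced to.
def pvF (s : List Char) : List Char :=
  if s.length ≤ 6 then pvFmt08b s.length ++ pvBits s
  else pvFmt08b 6 ++ pvBits (s.take 6) ++ pvF (s.drop 6)
termination_by s.length
decreasing_by simp_all; omega

theorem pv_flatMap_sing {α β : Type} (l : List α) (f : α → β) :
    l.flatMap (fun x => [f x]) = l.map f := by
  induction l <;> simp_all

-- A's else-branch, over drop/take, as a standalone function of the byte list.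
def pvElse (bs : List (List Char)) : List Char :=
  (if bs.length % 6 ≠ 0 then
      (List.range (bs.length / 6)).map (fun i => pvFmt08b 6 ++ ((bs.drop (i * 6)).take 6).flatten)
        ++ [pvFmt08b (bs.length % 6) ++ (bs.drop (bs.length / 6 * 6)).flatten]
    else (List.range (bs.length / 6)).map (fun i => pvFmt08b 6 ++ ((bs.drop (i * 6)).take 6).flatten)).flatten

theorem pvACore_eq_pvElse (bs : List (List Char)) (h : 1 ≤ bs.length) :
    pvACore bs = pvElse bs := by
  unfold pvACore pvElse
  simp only [PySem.List.foldl_append_eq_flatMap, PySem.List.slice_natCast,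
    PySem.List.slice_from_natCast, List.nil_append,
    show ∀ x : Nat, (x + 1) * 6 - x * 6 = 6 from fun x => by omega]
  by_cases h6 : bs.length ≤ 6
  · simp only [if_pos h6]
    interval_cases hn : bs.length <;>
      simp_all [List.range_succ, List.take_of_length_le]
  · simp [pv_flatMap_sing, h6]

theorem pvElse_step (bs : List (List Char)) (h : 6 ≤ bs.length) :
    pvElse bs = pvFmt08b 6 ++ (bs.take 6).flatten ++ pvElse (bs.drop 6) := by
  unfold pvElse
  have hdiv : bs.length / 6 = (bs.length - 6) / 6 + 1 := by omega
  have hmod : bs.length % 6 = (bs.length - 6) % 6 := by omega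
  have hdl : (bs.drop 6).length = bs.length - 6 := by simp
  rw [hdiv, hmod, hdl, List.range_succ_eq_map]
  simp only [List.map_cons, List.map_map, Nat.zero_mul, List.drop_zero]
  have hsh : ∀ i : Nat, bs.drop ((i + 1) * 6) = (bs.drop 6).drop (i * 6) := by
    intro i
    rw [List.drop_drop]
    congr 1
    omega
  have hframes :
      (List.map ((fun i => pvFmt08b 6 ++ ((bs.drop (i * 6)).take 6).flatten) ∘ (· + 1))
        (List.range ((bs.length - 6) / 6)))
      = List.map (fun i => pvFmt08b 6 ++ (((bs.drop 6).drop (i * 6)).take 6).flatten)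
        (List.range ((bs.length - 6) / 6)) := by
    refine List.map_congr_left ?_
    intro i _
    simp [Function.comp, hsh i]
  rw [hframes]
  have hrem : bs.drop (((bs.length - 6) / 6 + 1) * 6)
      = (bs.drop 6).drop ((bs.length - 6) / 6 * 6) := hsh _
  rw [hrem]
  by_cases hz : (bs.length - 6) % 6 ≠ 0 <;> simp [hz, List.append_assoc]

theorem pvACore_map_eq_pvF (L : List Char) :
    pvACore (L.map (fun c => pvFmt08b c.toNat)) = pvF L := by
  induction hn : L.length using Nat.strong_induction_on generalizing L with
  | _ n ih =>
    subst hn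
    by_cases h6 : L.length ≤ 6
    · rw [pvF]
      simp only [if_pos h6]
      unfold pvACore
      simp [pvBits, h6]
    · rw [pvF]
      simp only [if_neg h6]
      rw [pvACore_eq_pvElse _ (by simp; omega)]
      rw [pvElse_step _ (by simp; omega)]
      rw [← List.map_take, ← List.map_drop]
      rw [pvACore_eq_pvElse _ (by simp; omega) |>.symm]
      rw [ih (L.drop 6).length (by simp; omega) (L.drop 6) rfl]
      simp [pvBits]

-- B's streaming loop, under its invariant (buf/cnt come from the current partial
-- chunk, which has fewer than 6 chars), computes pvF of chunk ++ rest.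
theorem pvBGo_eq_pvF (rest : List Char) :
    ∀ (frames : List (List Char)) (chunk : List Char),
      chunk.length < 6 → (frames = [] ∨ chunk ≠ [] ∨ rest ≠ []) →
      (pvBGo frames (pvBits chunk) chunk.length rest).flatten
        = frames.flatten ++ pvF (chunk ++ rest) := by
  induction rest with
  | nil =>
    intro frames chunk hlt hcond
    simp only [pvBGo, List.append_nil]
    by_cases hc : chunk.length ≠ 0 ∨ frames = []
    · rw [if_pos hc, pvF, if_pos (by omega)]
      simp
    · exfalso
      push_neg at hc
      rcases hcond with h | h | h
      · exact hc.2 h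
      · exact h (List.eq_nil_of_length_eq_zero hc.1)
      · exact h rfl
  | cons c rest ih =>
    intro frames chunk hlt hcond
    simp only [pvBGo]
    by_cases h6 : chunk.length + 1 = 6
    · rw [if_pos h6]
      have hbits : pvBits chunk ++ pvFmt08b c.toNat = pvBits (chunk ++ [c]) := by
        simp [pvBits]
      have hlen6 : (chunk ++ [c]).length = 6 := by simp; omega
      cases rest with
      | nil =>
        simp only [pvBGo]
        rw [if_neg (by simp)]
        rw [pvF, if_pos (by simp; omega)]
        simp [hlen6, pvBits]
      | cons d rest' =>
        have := ih (frames ++ [pvFmt08b 6 ++ (pvBits chunk ++ pvFmt08b c.toNat)]) []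
          (by simp) (Or.inr (Or.inr (by simp)))
        simp only [pvBits, List.map_nil, List.flatten_nil, List.length_nil,
          List.nil_append] at this
        simp only [pvBits]
        rw [this]
        conv_rhs => rw [pvF]
        rw [if_neg (show ¬ (chunk ++ c :: d :: rest').length ≤ 6 by simp; omega)]
        have htk : (chunk ++ c :: d :: rest').take 6 = chunk ++ [c] := by
          have : chunk ++ c :: d :: rest' = (chunk ++ [c]) ++ d :: rest' := by simp
          rw [this, List.take_append_of_le_length (by omega),
            List.take_of_length_le (by omega)]
        have hdp : (chunk ++ c :: d :: rest').drop 6 = d :: rest' := by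
          have : chunk ++ c :: d :: rest' = (chunk ++ [c]) ++ d :: rest' := by simp
          rw [this, List.drop_append_of_le_length (by omega),
            List.drop_of_length_le (by omega)]
          simp
        rw [htk, hdp]
        simp [pvBits, List.append_assoc]
    · rw [if_neg h6]
      have hbits : pvBits chunk ++ pvFmt08b c.toNat = pvBits (chunk ++ [c]) := by
        simp [pvBits]
      have hlen : chunk.length + 1 = (chunk ++ [c]).length := by simp
      rw [hbits, hlen]
      rw [ih frames (chunk ++ [c]) (by simp; omega) (Or.inr (Or.inl (by simp)))]
      simp

-- ===== VERDICT (by name: the statement is the Claim_ definition above) =====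
theorem Transmissor_contagem_caractere_bytes_spec : Claim_equal_Transmissor_contagem_caractere_bytes := by
  intro entrada tamanho_quadro _
  unfold Spec_Transmissor_contagem_caractere_bytes
  unfold Transmissor_contagem_caractere_bytes Transmissor_contagem_caractere_bytes_alt
  have := pvBGo_eq_pvF entrada.toList [] [] (by simp) (Or.inl rfl)
  simp only [pvBits, List.map_nil, List.flatten_nil, List.length_nil,
    List.nil_append] at this
  rw [this, pvACore_map_eq_pvF]
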